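-- pv_equiv track=rewrite | github.com/HassanSalah120/Best-Practices-Doctor | backend/rules/react/react_parent_child_spacing_overlap.py | _split_spacing_utility
-- ===== SOURCE A (Python) =====
-- def _split_spacing_utility(utility: str) -> tuple[str, str]:
--     for prefix in (
--         "space-x-",
--         "space-y-",
--         "gap-x-",
--         "gap-y-",
--         "gap-",
--         "px-",
--         "py-",
--         "pt-",
--         "pb-",
--         "pl-",
--         "pr-",
--         "p-",
--         "mx-",
--         "my-",
--         "mt-",
--         "mb-",
--         "ml-",
--         "mr-",
--         "m-",
--     ):
--         if utility.startswith(prefix):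
--             key = prefix[:-1]
--             value = utility[len(prefix) :].strip()
--             return key, value
--
--     # Support compact patterns where single-letter key can appear first in matching order.
--     if utility.startswith("p") and "-" in utility:
--         key, value = utility.split("-", 1)
--         if key in {"p", "px", "py", "pt", "pb", "pl", "pr"}:
--             return key, value.strip()
--     if utility.startswith("m") and "-" in utility:
--         key, value = utility.split("-", 1)
--         if key in {"m", "mx", "my", "mt", "mb", "ml", "mr"}:
--             return key, value.strip()
--
--     return "", ""
-- ===== SOURCE B (Python) =====
-- _TWO_SEG = {"space-x", "space-y", "gap-x", "gap-y"}
-- _ONE_SEG = {"gap", "px", "py", "pt", "pb", "pl", "pr", "p",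
--             "mx", "my", "mt", "mb", "ml", "mr", "m"}
--
--
-- def _split_spacing_utility(utility: str) -> tuple[str, str]:
--     match utility.split("-", 2):
--         case [a, b, c]:
--             head = "-".join([a, b])
--             if head in _TWO_SEG:
--                 return head, c.strip()
--             if a in _ONE_SEG:
--                 return a, "-".join([b, c]).strip()
--             return "", ""
--         case [a, b]:
--             if a in _ONE_SEG:
--                 return a, b.strip()
--             return "", ""
--         case _:
--             return "", ""
-- ===== Notes on version B (the rewrite author's own statement) =====
-- stated objective: simpler
-- what changed: A's ordered 19-prefix scan plus two unreachable single-letter fallback blocks is replaced by one maxsplit-2 split on the dash separator followed by two set-membership lookups (two-segment keys on the first two parts, one-segment keys on the first part).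
import Mathlib
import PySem

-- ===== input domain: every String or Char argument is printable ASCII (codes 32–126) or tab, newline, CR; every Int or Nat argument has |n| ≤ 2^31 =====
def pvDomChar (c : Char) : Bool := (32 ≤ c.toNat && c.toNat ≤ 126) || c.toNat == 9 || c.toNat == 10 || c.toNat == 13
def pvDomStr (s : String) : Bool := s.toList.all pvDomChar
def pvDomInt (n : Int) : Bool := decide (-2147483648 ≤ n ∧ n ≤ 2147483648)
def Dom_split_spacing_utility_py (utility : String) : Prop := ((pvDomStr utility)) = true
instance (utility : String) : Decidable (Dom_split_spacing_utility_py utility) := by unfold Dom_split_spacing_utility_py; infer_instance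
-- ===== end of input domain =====

-- B replaces A's 19-way ordered prefix scan (plus two unreachable fallback blocks) by one
-- split("-", 2) and two set lookups; objective: simpler, same exact return value.

-- ===== PORT A =====
def pvPrefixes : List String :=
  ["space-x-", "space-y-", "gap-x-", "gap-y-", "gap-",
   "px-", "py-", "pt-", "pb-", "pl-", "pr-", "p-",
   "mx-", "my-", "mt-", "mb-", "ml-", "mr-", "m-"]

-- the `for prefix in (…): if utility.startswith(prefix): return …` loop
def pvALoop (utility : String) : List String → Option (String × String)
  | [] => none
  | p :: rest =>
    if PySem.Str.startswith utility p = true then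
      some (PySem.Str.slice p none (some (-1)),
            PySem.Str.strip (PySem.Str.slice utility (some (PySem.Str.len p)) none))
    else pvALoop utility rest

-- Python's two textually identical compact-pattern fallback blocks, as one parametrized helper
def pvAFallback (utility letter : String) (keys : List String) : Option (String × String) :=
  -- if utility.startswith(letter) and "-" in utility: key, value = utility.split("-", 1); if key in keys: return key, value.strip()
  if PySem.Str.startswith utility letter && PySem.Str.isIn "-" utility then
    match (PySem.Str.splitMax? utility "-" 1).getD [] with
    | [key, value] =>
      if key ∈ keys then some (key, PySem.Str.strip value) else none
    | _ => none
  else none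

def split_spacing_utility_py (utility : String) : String × String :=
  match pvALoop utility pvPrefixes with
  | some kv => kv
  | none =>
    match pvAFallback utility "p" ["p", "px", "py", "pt", "pb", "pl", "pr"] with
    | some kv => kv
    | none =>
      match pvAFallback utility "m" ["m", "mx", "my", "mt", "mb", "ml", "mr"] with
      | some kv => kv
      | none => ("", "")

-- ===== PORT B =====
def pvTwoSeg : List String := ["space-x", "space-y", "gap-x", "gap-y"]
def pvOneSeg : List String :=
  ["gap", "px", "py", "pt", "pb", "pl", "pr", "p",
   "mx", "my", "mt", "mb", "ml", "mr", "m"]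

def split_spacing_utility_py_alt (utility : String) : String × String :=
  match (PySem.Str.splitMax? utility "-" 2).getD [] with
  | [a, b, c] =>
    let head := PySem.Str.join "-" [a, b]
    if head ∈ pvTwoSeg then (head, PySem.Str.strip c)
    else if a ∈ pvOneSeg then (a, PySem.Str.strip (PySem.Str.join "-" [b, c]))
    else ("", "")
  | [a, b] =>
    if a ∈ pvOneSeg then (a, PySem.Str.strip b)
    else ("", "")
  | _ => ("", "")

-- ===== PRECONDITION & SPEC =====
def Spec_split_spacing_utility_py (utility : String) (out : String × String) : Prop := out = split_spacing_utility_py_alt utility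
instance (utility : String) (out : String × String) : Decidable (Spec_split_spacing_utility_py utility out) := by unfold Spec_split_spacing_utility_py; infer_instance

-- ===== CLAIM (what is proved, stated in full; the proofs are below) =====
def Claim_equal_split_spacing_utility_py : Prop := ∀ (utility : String), Dom_split_spacing_utility_py utility → Spec_split_spacing_utility_py utility (split_spacing_utility_py utility)

-- ===== LEMMAS AND PROOFS =====


lemma pv_go_m0 (fuel : Nat) (l cur acc) :
    PySem.Chars.splitOnMax.go ['-'] fuel 0 l cur acc = ((cur.reverse ++ l) :: acc).reverse := by
  cases fuel with
  | zero => simp [PySem.Chars.splitOnMax.go]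
  | succ f => cases l <;> simp [PySem.Chars.splitOnMax.go]

lemma pv_go_nodash (l : List Char) (hl : '-' ∉ l) : ∀ (fuel m : Nat) (cur acc), l.length ≤ fuel →
    PySem.Chars.splitOnMax.go ['-'] fuel m l cur acc = ((cur.reverse ++ l) :: acc).reverse := by
  induction l with
  | nil => intro fuel m cur acc _; cases fuel <;> simp [PySem.Chars.splitOnMax.go]
  | cons c rest ih =>
    intro fuel m cur acc hf
    obtain ⟨f, rfl⟩ : ∃ f, fuel = f + 1 := ⟨fuel - 1, by simp at hf; omega⟩
    rcases Nat.eq_zero_or_pos m with hm | hm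
    · subst hm; exact pv_go_m0 _ _ _ _
    · have hc : c ≠ '-' := fun h => hl (by simp [h])
      have hpre : List.isPrefixOf ['-'] (c :: rest) = false := by
        simp [List.isPrefixOf]; exact fun h => (hc h.symm).elim
      have hm' : m ≠ 0 := by omega
      rw [show PySem.Chars.splitOnMax.go ['-'] (f+1) m (c::rest) cur acc
           = PySem.Chars.splitOnMax.go ['-'] f m rest (c::cur) acc by
        simp [PySem.Chars.splitOnMax.go, hm', hpre]]
      rw [ih (fun h => hl (by simp [h])) f m (c::cur) acc (by simpa using hf)]
      simp

lemma pv_go_dash (a : List Char) (ha : '-' ∉ a) : ∀ (fuel m : Nat) (t cur acc), m ≠ 0 → a.length + 1 ≤ fuel →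
    PySem.Chars.splitOnMax.go ['-'] fuel m (a ++ '-' :: t) cur acc
      = PySem.Chars.splitOnMax.go ['-'] (fuel - (a.length + 1)) (m - 1) t [] ((cur.reverse ++ a) :: acc) := by
  induction a with
  | nil =>
    intro fuel m t cur acc hm hf
    obtain ⟨f, rfl⟩ : ∃ f, fuel = f + 1 := ⟨fuel - 1, by omega⟩
    simp [PySem.Chars.splitOnMax.go, hm]
  | cons c a' ih =>
    intro fuel m t cur acc hm hf
    obtain ⟨f, rfl⟩ : ∃ f, fuel = f + 1 := ⟨fuel - 1, by simp at hf; omega⟩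
    have hc : c ≠ '-' := fun h => ha (by simp [h])
    have hpre : List.isPrefixOf ['-'] (c :: (a' ++ '-' :: t)) = false := by
      simp [List.isPrefixOf]; exact fun h => (hc h.symm).elim
    rw [show PySem.Chars.splitOnMax.go ['-'] (f+1) m ((c::a') ++ '-'::t) cur acc
         = PySem.Chars.splitOnMax.go ['-'] f m (a' ++ '-'::t) (c::cur) acc by
      simp [PySem.Chars.splitOnMax.go, hm, hpre]]
    rw [ih (fun h => ha (by simp [h])) f m t (c::cur) acc hm (by simp at hf ⊢; omega)]
    simp

lemma pv_splitOnMax_nodash (l : List Char) (hl : '-' ∉ l) (m : Nat) :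
    PySem.Chars.splitOnMax l ['-'] (m : Int) = [l] := by
  rw [PySem.Chars.splitOnMax]
  simp only [show ¬((m:Int) < 0) by omega, if_false]
  rw [pv_go_nodash l hl _ _ [] [] (by simp)]
  simp

lemma pv_splitOnMax_one (a t : List Char) (ha : '-' ∉ a) :
    PySem.Chars.splitOnMax (a ++ '-' :: t) ['-'] 1 = [a, t] := by
  rw [PySem.Chars.splitOnMax]
  norm_num
  rw [pv_go_dash a ha _ _ _ _ _ (by omega) (by simp)]
  rw [pv_go_m0]
  simp

lemma pv_splitOnMax_two_short (a t : List Char) (ha : '-' ∉ a) (ht : '-' ∉ t) :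
    PySem.Chars.splitOnMax (a ++ '-' :: t) ['-'] 2 = [a, t] := by
  rw [PySem.Chars.splitOnMax]
  norm_num
  rw [pv_go_dash a ha _ _ _ _ _ (by omega) (by simp)]
  rw [pv_go_nodash t ht _ _ _ _ (by simp)]
  simp

lemma pv_splitOnMax_two (a b c : List Char) (ha : '-' ∉ a) (hb : '-' ∉ b) :
    PySem.Chars.splitOnMax (a ++ '-' :: (b ++ '-' :: c)) ['-'] 2 = [a, b, c] := by
  rw [PySem.Chars.splitOnMax]
  norm_num
  rw [pv_go_dash a ha _ _ _ _ _ (by omega) (by simp)]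
  rw [pv_go_dash b hb _ _ _ _ _ (by simp) (by simp)]
  rw [show Int.toNat 2 - 1 - 1 = 0 by rfl, pv_go_m0]
  simp

lemma pv_dashString : ("-" : String).toList = ['-'] := by decide

lemma pv_split1 (u : String) (a t : List Char) (hu : u.toList = a ++ '-' :: t) (ha : '-' ∉ a) :
    PySem.Str.splitMax? u "-" 1 = some [String.ofList a, String.ofList t] := by
  rw [PySem.Str.splitMax?, PySem.Chars.splitMax?, pv_dashString, hu]
  rw [pv_splitOnMax_one a t ha]
  rfl

lemma pv_split2_nodash (u : String) (hl : '-' ∉ u.toList) :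
    PySem.Str.splitMax? u "-" 2 = some [u] := by
  rw [PySem.Str.splitMax?, PySem.Chars.splitMax?, pv_dashString]
  rw [show (2:Int) = ((2:Nat):Int) from rfl, pv_splitOnMax_nodash _ hl]
  simp [String.ofList_toList]

lemma pv_split2_short (u : String) (a t : List Char) (hu : u.toList = a ++ '-' :: t)
    (ha : '-' ∉ a) (ht : '-' ∉ t) :
    PySem.Str.splitMax? u "-" 2 = some [String.ofList a, String.ofList t] := by
  rw [PySem.Str.splitMax?, PySem.Chars.splitMax?, pv_dashString, hu]
  rw [pv_splitOnMax_two_short a t ha ht]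
  rfl

lemma pv_split2 (u : String) (a b c : List Char) (hu : u.toList = a ++ '-' :: (b ++ '-' :: c))
    (ha : '-' ∉ a) (hb : '-' ∉ b) :
    PySem.Str.splitMax? u "-" 2 = some [String.ofList a, String.ofList b, String.ofList c] := by
  rw [PySem.Str.splitMax?, PySem.Chars.splitMax?, pv_dashString, hu]
  rw [pv_splitOnMax_two a b c ha hb]
  rfl

lemma pv_dash_decomp (l : List Char) : '-' ∉ l ∨ ∃ a t, l = a ++ '-' :: t ∧ '-' ∉ a := by
  induction l with
  | nil => left; simp
  | cons c l' ih =>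
    by_cases hc : c = '-'
    · right; exact ⟨[], l', by simp [hc], by simp⟩
    · rcases ih with h | ⟨a, t, rfl, ha⟩
      · left
        intro hmem
        rcases List.mem_cons.mp hmem with h' | h'
        · exact hc h'.symm
        · exact h h'
      · right
        refine ⟨c :: a, t, rfl, ?_⟩
        intro hmem
        rcases List.mem_cons.mp hmem with h' | h'
        · exact hc h'.symm
        · exact ha h'

lemma pv_prefix_dash_iff {k a : List Char} (r t : List Char) (hk : '-' ∉ k) (ha : '-' ∉ a) :
    (k ++ '-' :: r <+: a ++ '-' :: t) ↔ (k = a ∧ r <+: t) := by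
  induction k generalizing a with
  | nil =>
    cases a with
    | nil => simp
    | cons c a' =>
      simp only [List.nil_append, List.cons_append, List.cons_prefix_cons]
      constructor
      · rintro ⟨h, -⟩; exact absurd h.symm (by simp at ha; tauto)
      · rintro ⟨h, -⟩; exact absurd h (by simp)
  | cons d k' ih =>
    cases a with
    | nil =>
      simp only [List.cons_append, List.nil_append, List.cons_prefix_cons]
      constructor
      · rintro ⟨h, -⟩; exact absurd h (by simp at hk; tauto)
      · rintro ⟨h, -⟩; exact absurd h (by simp)
    | cons c a' =>
      simp only [List.cons_append, List.cons_prefix_cons]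
      rw [ih (by simp at hk; tauto) (by simp at ha; tauto)]
      constructor
      · rintro ⟨rfl, rfl, h⟩; exact ⟨rfl, h⟩
      · rintro ⟨h, hr⟩; cases h; exact ⟨rfl, rfl, hr⟩

lemma pv_sw_iff (u p : String) : PySem.Str.startswith u p = true ↔ p.toList <+: u.toList := by
  simp [PySem.Str.startswith, PySem.Chars.startswith_iff]

lemma pv_csw_nodash {l : List Char} (hl : '-' ∉ l) (p : List Char) (hp : '-' ∈ p) :
    PySem.Chars.startswith l p = false := by
  rw [Bool.eq_false_iff, Ne, PySem.Chars.startswith_iff]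
  exact fun h => hl (h.subset hp)

lemma pv_cisIn_false {l : List Char} (hl : '-' ∉ l) : PySem.Chars.isIn ['-'] l = false := by
  rw [PySem.Chars.isIn_eq_false_iff]
  exact fun h => hl (h.subset (by simp))

lemma pv_sw_one (u p : String) (a t k : List Char) (hu : u.toList = a ++ '-' :: t)
    (hp : p.toList = k ++ ['-']) (hk : '-' ∉ k) (ha : '-' ∉ a) :
    PySem.Str.startswith u p = decide (a = k) := by
  by_cases h : a = k
  · subst h
    rw [show PySem.Str.startswith u p = true from (pv_sw_iff u p).mpr (by
      rw [hu, hp, show a ++ ['-'] = a ++ '-' :: ([] : List Char) from rfl]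
      exact (pv_prefix_dash_iff [] t hk ha).mpr ⟨rfl, List.nil_prefix⟩)]
    simp
  · simp only [h, decide_false]
    rw [Bool.eq_false_iff, Ne, pv_sw_iff, hu, hp]
    intro hpre
    exact h ((pv_prefix_dash_iff [] t hk ha).mp (by simpa using hpre)).1.symm

lemma pv_sw_two (u p : String) (a b c k1 k2 : List Char) (hu : u.toList = a ++ '-' :: (b ++ '-' :: c))
    (hp : p.toList = k1 ++ '-' :: (k2 ++ ['-'])) (hk1 : '-' ∉ k1) (hk2 : '-' ∉ k2)
    (ha : '-' ∉ a) (hb : '-' ∉ b) :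
    PySem.Str.startswith u p = decide (a = k1 ∧ b = k2) := by
  have key : (p.toList <+: u.toList) ↔ (a = k1 ∧ b = k2) := by
    rw [hu, hp, pv_prefix_dash_iff _ _ hk1 ha]
    rw [show k2 ++ ['-'] = k2 ++ '-' :: [] from rfl]
    rw [pv_prefix_dash_iff _ _ hk2 hb]
    constructor
    · rintro ⟨h1, h2, -⟩; exact ⟨h1.symm, h2.symm⟩
    · rintro ⟨h1, h2⟩; exact ⟨h1.symm, h2.symm, List.nil_prefix⟩
  by_cases h : a = k1 ∧ b = k2
  · rw [show PySem.Str.startswith u p = true from (pv_sw_iff u p).mpr (key.mpr h)]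
    simp [h]
  · simp only [h, decide_false]
    rw [Bool.eq_false_iff, Ne, pv_sw_iff, key]
    exact h

lemma pv_sw_two_false (u p : String) (a t k1 k2 : List Char) (hu : u.toList = a ++ '-' :: t)
    (hp : p.toList = k1 ++ '-' :: (k2 ++ ['-'])) (hk1 : '-' ∉ k1)
    (ha : '-' ∉ a) (ht : '-' ∉ t) :
    PySem.Str.startswith u p = false := by
  rw [Bool.eq_false_iff, Ne, pv_sw_iff, hu, hp, pv_prefix_dash_iff _ _ hk1 ha]
  rintro ⟨-, h2⟩
  exact ht (h2.subset (by simp))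

lemma pv_ofList_eq_iff (l : List Char) (s : String) : String.ofList l = s ↔ l = s.toList :=
  ⟨fun h => by rw [← h, String.toList_ofList], fun h => by rw [h, String.ofList_toList]⟩

lemma pv_strip_ofList (t : List Char) :
    PySem.Str.strip (String.ofList t) = String.ofList (PySem.Chars.strip t) := by
  simp [PySem.Str.strip, String.toList_ofList]

lemma pv_branch_val (u p : String) (w rest : List Char) (hu : u.toList = w ++ '-' :: rest)
    (hp : p.toList = w ++ ['-']) :
    PySem.Str.strip (PySem.Str.slice u (some (PySem.Str.len p)) none)
      = String.ofList (PySem.Chars.strip rest) := by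
  have hlen : PySem.Str.len p = ((w.length + 1 : Nat) : Int) := by
    simp [PySem.Str.len, hp]
  rw [hlen]
  have hsl : PySem.Str.slice u (some ((w.length + 1 : Nat) : Int)) none = String.ofList rest := by
    rw [PySem.Str.slice]
    congr 1
    rw [PySem.Chars.slice_eq_listSlice, PySem.List.slice_from _ (by positivity), hu]
    rw [show w ++ '-' :: rest = (w ++ ['-']) ++ rest by simp]
    simp
  rw [hsl, pv_strip_ofList]

lemma pv_branch_key (p : String) (w : List Char) (hp : p.toList = w ++ ['-']) :
    PySem.Str.slice p none (some (-1)) = String.ofList w := by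
  symm
  rw [pv_ofList_eq_iff, PySem.Str.slice_to_neg_one, hp]
  simp

lemma pv_pfx_false {t : List Char} (ht : '-' ∉ t) (x : Char) (r : List Char) :
    List.isPrefixOf (x :: '-' :: r) t = false := by
  rw [Bool.eq_false_iff, Ne, List.isPrefixOf_iff_prefix]
  intro h
  exact ht (h.subset (by simp))

lemma pv_ipo2 {b : List Char} (hb : '-' ∉ b) {x : Char} (hx : x ≠ '-') (hbx : b ≠ [x])
    (r c : List Char) : List.isPrefixOf (x :: '-' :: r) (b ++ '-' :: c) = false := by
  rw [Bool.eq_false_iff, Ne, List.isPrefixOf_iff_prefix]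
  rw [show x :: '-' :: r = [x] ++ '-' :: r from rfl]
  rw [pv_prefix_dash_iff _ _ (by simp; exact fun h => hx h.symm) hb]
  rintro ⟨h, -⟩
  exact hbx h.symm

lemma pv_join2 (x y : List Char) :
    PySem.Str.join "-" [String.ofList x, String.ofList y] = String.ofList (x ++ '-' :: y) := by
  simp [PySem.Str.join, PySem.Chars.join, String.toList_ofList, List.intercalate]

lemma pv_append_dash_inj {a s : List Char} (ha : '-' ∉ a) (hs : '-' ∉ s) (b x : List Char) :
    a ++ '-' :: b = s ++ '-' :: x ↔ a = s ∧ b = x := by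
  constructor
  · intro h
    have h1 : a = s := by
      have := (pv_prefix_dash_iff (k := a) (a := s) b x ha hs).mp (h ▸ List.prefix_refl _)
      exact this.1
    subst h1
    exact ⟨rfl, by simpa using h⟩
  · rintro ⟨rfl, rfl⟩; rfl

def pvOneSegC : List (List Char) := ["gap".toList, "px".toList, "py".toList, "pt".toList, "pb".toList, "pl".toList, "pr".toList, "p".toList, "mx".toList, "my".toList, "mt".toList, "mb".toList, "ml".toList, "mr".toList, "m".toList]

lemma pv_mem_iff (a : List Char) : (String.ofList a ∈ pvOneSeg) ↔ a ∈ pvOneSegC := by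
  simp [pvOneSeg, pvOneSegC, pv_ofList_eq_iff]

lemma pv_notmem_p (a : List Char) (hm : a ∉ pvOneSegC) :
    String.ofList a ∉ (["p", "px", "py", "pt", "pb", "pl", "pr"] : List String) := by
  intro h
  apply hm
  simp only [List.mem_cons, List.not_mem_nil, or_false, pv_ofList_eq_iff] at h
  simp only [pvOneSegC, List.mem_cons]
  rcases h with h|h|h|h|h|h|h <;> simp [h]

lemma pv_notmem_m (a : List Char) (hm : a ∉ pvOneSegC) :
    String.ofList a ∉ (["m", "mx", "my", "mt", "mb", "ml", "mr"] : List String) := by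
  intro h
  apply hm
  simp only [List.mem_cons, List.not_mem_nil, or_false, pv_ofList_eq_iff] at h
  simp only [pvOneSegC, List.mem_cons]
  rcases h with h|h|h|h|h|h|h <;> simp [h]

lemma pv_loop_nodash (u : String) (hl : '-' ∉ u.toList) : pvALoop u pvPrefixes = none := by
  simp only [pvALoop, pvPrefixes]
  simp [pv_csw_nodash hl]

lemma pv_case0 (u : String) (hl : '-' ∉ u.toList) :
    split_spacing_utility_py u = split_spacing_utility_py_alt u := by
  simp [split_spacing_utility_py, pvAFallback, split_spacing_utility_py_alt, pv_loop_nodash u hl,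
        pv_cisIn_false hl, pv_split2_nodash u hl]

lemma pv_loop_one (u : String) (a t : List Char) (hu : u.toList = a ++ '-' :: t)
    (ha : '-' ∉ a) (ht : '-' ∉ t) :
    pvALoop u pvPrefixes
      = if a ∈ pvOneSegC then some (String.ofList a, String.ofList (PySem.Chars.strip t))
        else none := by
  by_cases hm : a ∈ pvOneSegC
  · rw [if_pos hm]
    simp only [pvOneSegC, List.mem_cons, List.not_mem_nil, or_false] at hm
    rcases hm with h|h|h|h|h|h|h|h|h|h|h|h|h|h|h
    · subst h
      simp only [pvALoop, pvPrefixes]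
      rw [pv_branch_key "gap-" ("gap".toList) (by decide),
          pv_branch_val u "gap-" ("gap".toList) t hu (by decide)]
      simp [PySem.Str.startswith, PySem.Chars.startswith, hu, pv_pfx_false ht]
    · subst h
      simp only [pvALoop, pvPrefixes]
      rw [pv_branch_key "px-" ("px".toList) (by decide),
          pv_branch_val u "px-" ("px".toList) t hu (by decide)]
      simp [PySem.Str.startswith, PySem.Chars.startswith, hu]
    · subst h
      simp only [pvALoop, pvPrefixes]
      rw [pv_branch_key "py-" ("py".toList) (by decide),
          pv_branch_val u "py-" ("py".toList) t hu (by decide)]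
      simp [PySem.Str.startswith, PySem.Chars.startswith, hu]
    · subst h
      simp only [pvALoop, pvPrefixes]
      rw [pv_branch_key "pt-" ("pt".toList) (by decide),
          pv_branch_val u "pt-" ("pt".toList) t hu (by decide)]
      simp [PySem.Str.startswith, PySem.Chars.startswith, hu]
    · subst h
      simp only [pvALoop, pvPrefixes]
      rw [pv_branch_key "pb-" ("pb".toList) (by decide),
          pv_branch_val u "pb-" ("pb".toList) t hu (by decide)]
      simp [PySem.Str.startswith, PySem.Chars.startswith, hu]
    · subst h
      simp only [pvALoop, pvPrefixes]
      rw [pv_branch_key "pl-" ("pl".toList) (by decide),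
          pv_branch_val u "pl-" ("pl".toList) t hu (by decide)]
      simp [PySem.Str.startswith, PySem.Chars.startswith, hu]
    · subst h
      simp only [pvALoop, pvPrefixes]
      rw [pv_branch_key "pr-" ("pr".toList) (by decide),
          pv_branch_val u "pr-" ("pr".toList) t hu (by decide)]
      simp [PySem.Str.startswith, PySem.Chars.startswith, hu]
    · subst h
      simp only [pvALoop, pvPrefixes]
      rw [pv_branch_key "p-" ("p".toList) (by decide),
          pv_branch_val u "p-" ("p".toList) t hu (by decide)]
      simp [PySem.Str.startswith, PySem.Chars.startswith, hu]
    · subst h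
      simp only [pvALoop, pvPrefixes]
      rw [pv_branch_key "mx-" ("mx".toList) (by decide),
          pv_branch_val u "mx-" ("mx".toList) t hu (by decide)]
      simp [PySem.Str.startswith, PySem.Chars.startswith, hu]
    · subst h
      simp only [pvALoop, pvPrefixes]
      rw [pv_branch_key "my-" ("my".toList) (by decide),
          pv_branch_val u "my-" ("my".toList) t hu (by decide)]
      simp [PySem.Str.startswith, PySem.Chars.startswith, hu]
    · subst h
      simp only [pvALoop, pvPrefixes]
      rw [pv_branch_key "mt-" ("mt".toList) (by decide),
          pv_branch_val u "mt-" ("mt".toList) t hu (by decide)]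
      simp [PySem.Str.startswith, PySem.Chars.startswith, hu]
    · subst h
      simp only [pvALoop, pvPrefixes]
      rw [pv_branch_key "mb-" ("mb".toList) (by decide),
          pv_branch_val u "mb-" ("mb".toList) t hu (by decide)]
      simp [PySem.Str.startswith, PySem.Chars.startswith, hu]
    · subst h
      simp only [pvALoop, pvPrefixes]
      rw [pv_branch_key "ml-" ("ml".toList) (by decide),
          pv_branch_val u "ml-" ("ml".toList) t hu (by decide)]
      simp [PySem.Str.startswith, PySem.Chars.startswith, hu]
    · subst h
      simp only [pvALoop, pvPrefixes]
      rw [pv_branch_key "mr-" ("mr".toList) (by decide),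
          pv_branch_val u "mr-" ("mr".toList) t hu (by decide)]
      simp [PySem.Str.startswith, PySem.Chars.startswith, hu]
    · subst h
      simp only [pvALoop, pvPrefixes]
      rw [pv_branch_key "m-" ("m".toList) (by decide),
          pv_branch_val u "m-" ("m".toList) t hu (by decide)]
      simp [PySem.Str.startswith, PySem.Chars.startswith, hu]
  · rw [if_neg hm]
    simp only [pvOneSegC, List.mem_cons, List.not_mem_nil, or_false, not_or] at hm
    obtain ⟨h1, h2, h3, h4, h5, h6, h7, h8, h9, h10, h11, h12, h13, h14, h15⟩ := hm
    simp only [pvALoop, pvPrefixes]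
    rw [pv_sw_two_false u "space-x-" a t ("space".toList) ("x".toList) hu (by decide) (by decide) ha ht,
        pv_sw_two_false u "space-y-" a t ("space".toList) ("y".toList) hu (by decide) (by decide) ha ht,
        pv_sw_two_false u "gap-x-" a t ("gap".toList) ("x".toList) hu (by decide) (by decide) ha ht,
        pv_sw_two_false u "gap-y-" a t ("gap".toList) ("y".toList) hu (by decide) (by decide) ha ht,
        pv_sw_one u "gap-" a t ("gap".toList) hu (by decide) (by decide) ha,
        pv_sw_one u "px-" a t ("px".toList) hu (by decide) (by decide) ha,
        pv_sw_one u "py-" a t ("py".toList) hu (by decide) (by decide) ha,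
        pv_sw_one u "pt-" a t ("pt".toList) hu (by decide) (by decide) ha,
        pv_sw_one u "pb-" a t ("pb".toList) hu (by decide) (by decide) ha,
        pv_sw_one u "pl-" a t ("pl".toList) hu (by decide) (by decide) ha,
        pv_sw_one u "pr-" a t ("pr".toList) hu (by decide) (by decide) ha,
        pv_sw_one u "p-" a t ("p".toList) hu (by decide) (by decide) ha,
        pv_sw_one u "mx-" a t ("mx".toList) hu (by decide) (by decide) ha,
        pv_sw_one u "my-" a t ("my".toList) hu (by decide) (by decide) ha,
        pv_sw_one u "mt-" a t ("mt".toList) hu (by decide) (by decide) ha,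
        pv_sw_one u "mb-" a t ("mb".toList) hu (by decide) (by decide) ha,
        pv_sw_one u "ml-" a t ("ml".toList) hu (by decide) (by decide) ha,
        pv_sw_one u "mr-" a t ("mr".toList) hu (by decide) (by decide) ha,
        pv_sw_one u "m-" a t ("m".toList) hu (by decide) (by decide) ha]
    simp_all

lemma pv_case1 (u : String) (a t : List Char) (hu : u.toList = a ++ '-' :: t)
    (ha : '-' ∉ a) (ht : '-' ∉ t) :
    split_spacing_utility_py u = split_spacing_utility_py_alt u := by
  have hloop := pv_loop_one u a t hu ha ht
  by_cases hm : a ∈ pvOneSegC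
  · rw [if_pos hm] at hloop
    simp only [split_spacing_utility_py, hloop]
    simp [split_spacing_utility_py_alt, pv_split2_short u a t hu ha ht, pv_mem_iff, hm,
          pv_strip_ofList]
  · rw [if_neg hm] at hloop
    simp only [split_spacing_utility_py, hloop]
    simp [pvAFallback, split_spacing_utility_py_alt, pv_split1 u a t hu ha,
          pv_split2_short u a t hu ha ht, pv_mem_iff, hm, pv_notmem_p a hm, pv_notmem_m a hm]

lemma pv_mem_two_iff (a b : List Char) (ha : '-' ∉ a) :
    (String.ofList (a ++ '-' :: b) ∈ pvTwoSeg)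
      ↔ ((a = "space".toList ∧ b = "x".toList) ∨ (a = "space".toList ∧ b = "y".toList)
          ∨ (a = "gap".toList ∧ b = "x".toList) ∨ (a = "gap".toList ∧ b = "y".toList)) := by
  have e1 : (String.ofList (a ++ '-' :: b) = "space-x") ↔ (a = "space".toList ∧ b = "x".toList) := by
    rw [pv_ofList_eq_iff,
        show ("space-x" : String).toList = "space".toList ++ '-' :: "x".toList by decide,
        pv_append_dash_inj ha (by decide)]
  have e2 : (String.ofList (a ++ '-' :: b) = "space-y") ↔ (a = "space".toList ∧ b = "y".toList) := by
    rw [pv_ofList_eq_iff,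
        show ("space-y" : String).toList = "space".toList ++ '-' :: "y".toList by decide,
        pv_append_dash_inj ha (by decide)]
  have e3 : (String.ofList (a ++ '-' :: b) = "gap-x") ↔ (a = "gap".toList ∧ b = "x".toList) := by
    rw [pv_ofList_eq_iff,
        show ("gap-x" : String).toList = "gap".toList ++ '-' :: "x".toList by decide,
        pv_append_dash_inj ha (by decide)]
  have e4 : (String.ofList (a ++ '-' :: b) = "gap-y") ↔ (a = "gap".toList ∧ b = "y".toList) := by
    rw [pv_ofList_eq_iff,
        show ("gap-y" : String).toList = "gap".toList ++ '-' :: "y".toList by decide,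
        pv_append_dash_inj ha (by decide)]
  simp only [pvTwoSeg, List.mem_cons, List.not_mem_nil, or_false, e1, e2, e3, e4]

lemma pv_loop_two (u : String) (a b c : List Char)
    (hu : u.toList = a ++ '-' :: (b ++ '-' :: c)) (ha : '-' ∉ a) (hb : '-' ∉ b) :
    pvALoop u pvPrefixes
      = if (a = "space".toList ∨ a = "gap".toList) ∧ (b = "x".toList ∨ b = "y".toList) then
          some (String.ofList (a ++ '-' :: b), String.ofList (PySem.Chars.strip c))
        else if a ∈ pvOneSegC then
          some (String.ofList a, String.ofList (PySem.Chars.strip (b ++ '-' :: c)))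
        else none := by
  by_cases h2 : (a = "space".toList ∨ a = "gap".toList) ∧ (b = "x".toList ∨ b = "y".toList)
  · rw [if_pos h2]
    obtain ⟨hA, hB⟩ := h2
    rcases hA with h|h <;> rcases hB with h'|h' <;> subst h <;> subst h'

    · simp only [pvALoop, pvPrefixes]
      rw [pv_branch_key "space-x-" ("space".toList ++ '-' :: "x".toList) (by decide),
          pv_branch_val u "space-x-" ("space".toList ++ '-' :: "x".toList) c (by rw [hu]; simp) (by decide)]
      simp [PySem.Str.startswith, PySem.Chars.startswith, hu]
    · simp only [pvALoop, pvPrefixes]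
      rw [pv_branch_key "space-y-" ("space".toList ++ '-' :: "y".toList) (by decide),
          pv_branch_val u "space-y-" ("space".toList ++ '-' :: "y".toList) c (by rw [hu]; simp) (by decide)]
      simp [PySem.Str.startswith, PySem.Chars.startswith, hu]
    · simp only [pvALoop, pvPrefixes]
      rw [pv_branch_key "gap-x-" ("gap".toList ++ '-' :: "x".toList) (by decide),
          pv_branch_val u "gap-x-" ("gap".toList ++ '-' :: "x".toList) c (by rw [hu]; simp) (by decide)]
      simp [PySem.Str.startswith, PySem.Chars.startswith, hu]
    · simp only [pvALoop, pvPrefixes]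
      rw [pv_branch_key "gap-y-" ("gap".toList ++ '-' :: "y".toList) (by decide),
          pv_branch_val u "gap-y-" ("gap".toList ++ '-' :: "y".toList) c (by rw [hu]; simp) (by decide)]
      simp [PySem.Str.startswith, PySem.Chars.startswith, hu]
  · rw [if_neg h2]
    by_cases hm : a ∈ pvOneSegC
    · rw [if_pos hm]
      simp only [pvOneSegC, List.mem_cons, List.not_mem_nil, or_false] at hm
      rcases hm with h|h|h|h|h|h|h|h|h|h|h|h|h|h|h
      · have hbx : b ≠ ['x'] := fun hh => h2 ⟨Or.inr h, by simp [hh]⟩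
        have hby : b ≠ ['y'] := fun hh => h2 ⟨Or.inr h, by simp [hh]⟩
        subst h
        simp only [pvALoop, pvPrefixes]
        rw [pv_branch_key "gap-" ("gap".toList) (by decide),
            pv_branch_val u "gap-" ("gap".toList) (b ++ '-' :: c) hu (by decide)]
        simp [PySem.Str.startswith, PySem.Chars.startswith, hu,
              pv_ipo2 hb (show ('x' : Char) ≠ '-' by decide) hbx,
              pv_ipo2 hb (show ('y' : Char) ≠ '-' by decide) hby]
      · subst h
        simp only [pvALoop, pvPrefixes]
        rw [pv_branch_key "px-" ("px".toList) (by decide),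
            pv_branch_val u "px-" ("px".toList) (b ++ '-' :: c) hu (by decide)]
        simp [PySem.Str.startswith, PySem.Chars.startswith, hu]
      · subst h
        simp only [pvALoop, pvPrefixes]
        rw [pv_branch_key "py-" ("py".toList) (by decide),
            pv_branch_val u "py-" ("py".toList) (b ++ '-' :: c) hu (by decide)]
        simp [PySem.Str.startswith, PySem.Chars.startswith, hu]
      · subst h
        simp only [pvALoop, pvPrefixes]
        rw [pv_branch_key "pt-" ("pt".toList) (by decide),
            pv_branch_val u "pt-" ("pt".toList) (b ++ '-' :: c) hu (by decide)]
        simp [PySem.Str.startswith, PySem.Chars.startswith, hu]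
      · subst h
        simp only [pvALoop, pvPrefixes]
        rw [pv_branch_key "pb-" ("pb".toList) (by decide),
            pv_branch_val u "pb-" ("pb".toList) (b ++ '-' :: c) hu (by decide)]
        simp [PySem.Str.startswith, PySem.Chars.startswith, hu]
      · subst h
        simp only [pvALoop, pvPrefixes]
        rw [pv_branch_key "pl-" ("pl".toList) (by decide),
            pv_branch_val u "pl-" ("pl".toList) (b ++ '-' :: c) hu (by decide)]
        simp [PySem.Str.startswith, PySem.Chars.startswith, hu]
      · subst h
        simp only [pvALoop, pvPrefixes]
        rw [pv_branch_key "pr-" ("pr".toList) (by decide),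
            pv_branch_val u "pr-" ("pr".toList) (b ++ '-' :: c) hu (by decide)]
        simp [PySem.Str.startswith, PySem.Chars.startswith, hu]
      · subst h
        simp only [pvALoop, pvPrefixes]
        rw [pv_branch_key "p-" ("p".toList) (by decide),
            pv_branch_val u "p-" ("p".toList) (b ++ '-' :: c) hu (by decide)]
        simp [PySem.Str.startswith, PySem.Chars.startswith, hu]
      · subst h
        simp only [pvALoop, pvPrefixes]
        rw [pv_branch_key "mx-" ("mx".toList) (by decide),
            pv_branch_val u "mx-" ("mx".toList) (b ++ '-' :: c) hu (by decide)]
        simp [PySem.Str.startswith, PySem.Chars.startswith, hu]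
      · subst h
        simp only [pvALoop, pvPrefixes]
        rw [pv_branch_key "my-" ("my".toList) (by decide),
            pv_branch_val u "my-" ("my".toList) (b ++ '-' :: c) hu (by decide)]
        simp [PySem.Str.startswith, PySem.Chars.startswith, hu]
      · subst h
        simp only [pvALoop, pvPrefixes]
        rw [pv_branch_key "mt-" ("mt".toList) (by decide),
            pv_branch_val u "mt-" ("mt".toList) (b ++ '-' :: c) hu (by decide)]
        simp [PySem.Str.startswith, PySem.Chars.startswith, hu]
      · subst h
        simp only [pvALoop, pvPrefixes]
        rw [pv_branch_key "mb-" ("mb".toList) (by decide),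
            pv_branch_val u "mb-" ("mb".toList) (b ++ '-' :: c) hu (by decide)]
        simp [PySem.Str.startswith, PySem.Chars.startswith, hu]
      · subst h
        simp only [pvALoop, pvPrefixes]
        rw [pv_branch_key "ml-" ("ml".toList) (by decide),
            pv_branch_val u "ml-" ("ml".toList) (b ++ '-' :: c) hu (by decide)]
        simp [PySem.Str.startswith, PySem.Chars.startswith, hu]
      · subst h
        simp only [pvALoop, pvPrefixes]
        rw [pv_branch_key "mr-" ("mr".toList) (by decide),
            pv_branch_val u "mr-" ("mr".toList) (b ++ '-' :: c) hu (by decide)]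
        simp [PySem.Str.startswith, PySem.Chars.startswith, hu]
      · subst h
        simp only [pvALoop, pvPrefixes]
        rw [pv_branch_key "m-" ("m".toList) (by decide),
            pv_branch_val u "m-" ("m".toList) (b ++ '-' :: c) hu (by decide)]
        simp [PySem.Str.startswith, PySem.Chars.startswith, hu]
    · rw [if_neg hm]
      have hsx : ¬(a = "space".toList ∧ b = "x".toList) := fun hh => h2 ⟨Or.inl hh.1, Or.inl hh.2⟩
      have hsy : ¬(a = "space".toList ∧ b = "y".toList) := fun hh => h2 ⟨Or.inl hh.1, Or.inr hh.2⟩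
      have hgx : ¬(a = "gap".toList ∧ b = "x".toList) := fun hh => h2 ⟨Or.inr hh.1, Or.inl hh.2⟩
      have hgy : ¬(a = "gap".toList ∧ b = "y".toList) := fun hh => h2 ⟨Or.inr hh.1, Or.inr hh.2⟩
      simp only [pvOneSegC, List.mem_cons, List.not_mem_nil, or_false, not_or] at hm
      obtain ⟨h1, h2, h3, h4, h5, h6, h7, h8, h9, h10, h11, h12, h13, h14, h15⟩ := hm
      simp only [pvALoop, pvPrefixes]
      rw [pv_sw_two u "space-x-" a b c ("space".toList) ("x".toList) hu (by decide) (by decide) (by decide) ha hb,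
          pv_sw_two u "space-y-" a b c ("space".toList) ("y".toList) hu (by decide) (by decide) (by decide) ha hb,
          pv_sw_two u "gap-x-" a b c ("gap".toList) ("x".toList) hu (by decide) (by decide) (by decide) ha hb,
          pv_sw_two u "gap-y-" a b c ("gap".toList) ("y".toList) hu (by decide) (by decide) (by decide) ha hb,
          pv_sw_one u "gap-" a (b ++ '-' :: c) ("gap".toList) hu (by decide) (by decide) ha,
          pv_sw_one u "px-" a (b ++ '-' :: c) ("px".toList) hu (by decide) (by decide) ha,
          pv_sw_one u "py-" a (b ++ '-' :: c) ("py".toList) hu (by decide) (by decide) ha,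
          pv_sw_one u "pt-" a (b ++ '-' :: c) ("pt".toList) hu (by decide) (by decide) ha,
          pv_sw_one u "pb-" a (b ++ '-' :: c) ("pb".toList) hu (by decide) (by decide) ha,
          pv_sw_one u "pl-" a (b ++ '-' :: c) ("pl".toList) hu (by decide) (by decide) ha,
          pv_sw_one u "pr-" a (b ++ '-' :: c) ("pr".toList) hu (by decide) (by decide) ha,
          pv_sw_one u "p-" a (b ++ '-' :: c) ("p".toList) hu (by decide) (by decide) ha,
          pv_sw_one u "mx-" a (b ++ '-' :: c) ("mx".toList) hu (by decide) (by decide) ha,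
          pv_sw_one u "my-" a (b ++ '-' :: c) ("my".toList) hu (by decide) (by decide) ha,
          pv_sw_one u "mt-" a (b ++ '-' :: c) ("mt".toList) hu (by decide) (by decide) ha,
          pv_sw_one u "mb-" a (b ++ '-' :: c) ("mb".toList) hu (by decide) (by decide) ha,
          pv_sw_one u "ml-" a (b ++ '-' :: c) ("ml".toList) hu (by decide) (by decide) ha,
          pv_sw_one u "mr-" a (b ++ '-' :: c) ("mr".toList) hu (by decide) (by decide) ha,
          pv_sw_one u "m-" a (b ++ '-' :: c) ("m".toList) hu (by decide) (by decide) ha]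
      rw [decide_eq_false hsx, decide_eq_false hsy, decide_eq_false hgx, decide_eq_false hgy,
          decide_eq_false h1,
          decide_eq_false h2,
          decide_eq_false h3,
          decide_eq_false h4,
          decide_eq_false h5,
          decide_eq_false h6,
          decide_eq_false h7,
          decide_eq_false h8,
          decide_eq_false h9,
          decide_eq_false h10,
          decide_eq_false h11,
          decide_eq_false h12,
          decide_eq_false h13,
          decide_eq_false h14,
          decide_eq_false h15]
      simp

lemma pv_case2 (u : String) (a b c : List Char)
    (hu : u.toList = a ++ '-' :: (b ++ '-' :: c)) (ha : '-' ∉ a) (hb : '-' ∉ b) :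
    split_spacing_utility_py u = split_spacing_utility_py_alt u := by
  have hloop := pv_loop_two u a b c hu ha hb
  by_cases h2 : (a = "space".toList ∨ a = "gap".toList) ∧ (b = "x".toList ∨ b = "y".toList)
  · rw [if_pos h2] at hloop
    have h4 : (a = "space".toList ∧ b = "x".toList) ∨ (a = "space".toList ∧ b = "y".toList)
        ∨ (a = "gap".toList ∧ b = "x".toList) ∨ (a = "gap".toList ∧ b = "y".toList) := by
      tauto
    simp only [split_spacing_utility_py, hloop]
    simp only [split_spacing_utility_py_alt, pv_split2 u a b c hu ha hb, Option.getD_some, pv_join2]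
    rw [if_pos ((pv_mem_two_iff a b ha).mpr h4), pv_strip_ofList]
  · rw [if_neg h2] at hloop
    have h4 : ¬((a = "space".toList ∧ b = "x".toList) ∨ (a = "space".toList ∧ b = "y".toList)
        ∨ (a = "gap".toList ∧ b = "x".toList) ∨ (a = "gap".toList ∧ b = "y".toList)) := by
      tauto
    have hmem2 : String.ofList (a ++ '-' :: b) ∉ pvTwoSeg := fun hh => h4 ((pv_mem_two_iff a b ha).mp hh)
    by_cases hm : a ∈ pvOneSegC
    · rw [if_pos hm] at hloop
      simp only [split_spacing_utility_py, hloop]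
      simp only [split_spacing_utility_py_alt, pv_split2 u a b c hu ha hb, Option.getD_some, pv_join2]
      rw [if_neg hmem2, if_pos ((pv_mem_iff a).mpr hm), pv_strip_ofList]
    · rw [if_neg hm] at hloop
      simp only [split_spacing_utility_py, hloop]
      simp only [split_spacing_utility_py_alt, pv_split2 u a b c hu ha hb, Option.getD_some, pv_join2]
      rw [if_neg hmem2, if_neg (fun hh => hm ((pv_mem_iff a).mp hh))]
      simp [pvAFallback, pv_split1 u a (b ++ '-' :: c) hu ha, pv_notmem_p a hm, pv_notmem_m a hm]

theorem pv_main (u : String) : split_spacing_utility_py u = split_spacing_utility_py_alt u := by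
  rcases pv_dash_decomp u.toList with hl | ⟨a, t, hu, ha⟩
  · exact pv_case0 u hl
  · rcases pv_dash_decomp t with ht | ⟨b, c, rfl, hb⟩
    · exact pv_case1 u a t hu ha ht
    · exact pv_case2 u a b c hu ha hb

-- ===== VERDICT (by name: the statement is the Claim_ definition above) =====
theorem split_spacing_utility_py_spec : Claim_equal_split_spacing_utility_py := by
  intro u _
  exact pv_main u
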